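-- pv_equiv track=rewrite | github.com/maddwiz/UnifiedStateCodec | archive/legacy/proto/stream_proto_canz_v3d_drain3.py | _bits_needed
-- ===== SOURCE A (Python) =====
-- def _bits_needed(n: int) -> int:
--     if n <= 1:
--         return 1
--     b = 0
--     x = n - 1
--     while x > 0:
--         b += 1
--         x >>= 1
--     return max(1, b)
-- ===== SOURCE B (Python) =====
-- def _bits_needed(n: int) -> int:
--     # Recursive halving: one bit splits the value range in two, so the width
--     # for n values is 1 + the width for ceil(n/2) values; base case: one bit.
--     if n <= 2:
--         return 1
--     return 1 + _bits_needed((n + 1) // 2)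
-- ===== Notes on version B (the rewrite author's own statement) =====
-- stated objective: alternative
-- what changed: Replaces the iterative shift-and-count loop over n-1 with a divide-and-conquer recursion on n itself (width(n) = 1 + width(ceil(n/2)), base case one bit), so no decremented copy of n is ever shifted.
import Mathlib
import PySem

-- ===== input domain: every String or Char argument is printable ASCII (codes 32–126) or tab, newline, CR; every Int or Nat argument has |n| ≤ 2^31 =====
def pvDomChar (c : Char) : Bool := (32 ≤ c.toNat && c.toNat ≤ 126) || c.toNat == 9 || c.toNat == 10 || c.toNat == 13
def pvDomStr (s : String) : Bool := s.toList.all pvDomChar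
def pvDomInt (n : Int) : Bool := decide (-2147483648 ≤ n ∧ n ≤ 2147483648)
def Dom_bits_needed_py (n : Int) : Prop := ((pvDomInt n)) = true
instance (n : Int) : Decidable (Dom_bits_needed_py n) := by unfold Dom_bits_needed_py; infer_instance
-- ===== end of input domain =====

-- B replaces A's shift-and-count loop over n-1 with a recursive halving on n
-- (width(n) = 1 + width(ceil(n/2)), base case one bit); same return value everywhere.

-- ===== PORT A =====
-- the 'while x > 0: b += 1; x >>= 1' loop (x >> 1 is floor division by 2)
def bitsLoopA (b x : Int) : Int :=
  if 0 < x then bitsLoopA (b + 1) (PySem.Int.floordiv x 2) else b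
termination_by x.toNat
decreasing_by
  rw [PySem.Int.floordiv_eq_ediv_of_pos (by omega)]
  omega

def bits_needed_py (n : Int) : Int :=
  if n ≤ 1 then 1
  else max 1 (bitsLoopA 0 (n - 1))

-- ===== PORT B =====
def bits_needed_py_alt (n : Int) : Int :=
  if n ≤ 2 then 1
  else 1 + bits_needed_py_alt (PySem.Int.floordiv (n + 1) 2)
termination_by n.toNat
decreasing_by
  rw [PySem.Int.floordiv_eq_ediv_of_pos (by omega)]
  omega

-- ===== PRECONDITION & SPEC =====
def Spec_bits_needed_py (n : Int) (out : Int) : Prop := out = bits_needed_py_alt n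
instance (n : Int) (out : Int) : Decidable (Spec_bits_needed_py n out) := by unfold Spec_bits_needed_py; infer_instance

-- ===== CLAIM (what is proved, stated in full; the proofs are below) =====
def Claim_equal_bits_needed_py : Prop := ∀ (n : Int), Dom_bits_needed_py n → Spec_bits_needed_py n (bits_needed_py n)

-- ===== LEMMAS AND PROOFS =====

theorem bitsLoopA_eq (k : Nat) (x b : Int) (hx : 0 < x) (hk : x.toNat ≤ k) :
    bitsLoopA b x = b + (PySem.Int.bitLength x : Int) := by
  induction k generalizing x b with
  | zero => omega
  | succ k ih =>
    rw [bitsLoopA, if_pos hx, PySem.Int.bitLength_of_pos hx]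
    by_cases h2 : 0 < PySem.Int.floordiv x 2
    · rw [ih _ _ h2]
      · push_cast; ring
      · rw [PySem.Int.floordiv_eq_ediv_of_pos (by omega)] at h2 ⊢
        omega
    · have hx2 : PySem.Int.floordiv x 2 = 0 := by
        rw [PySem.Int.floordiv_eq_ediv_of_pos (by omega)] at h2 ⊢
        omega
      rw [hx2, bitsLoopA]
      simp [PySem.Int.bitLength_zero]

theorem alt_eq_bitLength (k : Nat) (n : Int) (hn : 2 ≤ n) (hk : n.toNat ≤ k) :
    bits_needed_py_alt n = (PySem.Int.bitLength (n - 1) : Int) := by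
  induction k generalizing n with
  | zero => omega
  | succ k ih =>
    rw [bits_needed_py_alt]
    by_cases h2 : n ≤ 2
    · have : n = 2 := by omega
      subst this
      decide
    · rw [if_neg h2]
      have hm2 : 2 ≤ PySem.Int.floordiv (n + 1) 2 := by
        rw [PySem.Int.floordiv_eq_ediv_of_pos (by omega)]; omega
      rw [ih _ hm2]
      · have heq : PySem.Int.floordiv (n + 1) 2 - 1 = PySem.Int.floordiv (n - 1) 2 := by
          rw [PySem.Int.floordiv_eq_ediv_of_pos (by omega),
            PySem.Int.floordiv_eq_ediv_of_pos (by omega)]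
          omega
        rw [heq, PySem.Int.bitLength_of_pos (by omega : (0:Int) < n - 1)]
        push_cast; ring
      · rw [PySem.Int.floordiv_eq_ediv_of_pos (by omega)] at hm2 ⊢
        omega

-- ===== VERDICT (by name: the statement is the Claim_ definition above) =====
theorem bits_needed_py_spec : Claim_equal_bits_needed_py := by
  intro n _
  unfold Spec_bits_needed_py bits_needed_py
  by_cases h : n ≤ 1
  · rw [if_pos h, bits_needed_py_alt, if_pos (by omega)]
  · rw [if_neg h, bitsLoopA_eq (n - 1).toNat (n - 1) 0 (by omega) (le_refl _),
      alt_eq_bitLength n.toNat n (by omega) (le_refl _)]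
    have h1 : 1 ≤ PySem.Int.bitLength (n - 1) := by
      have := PySem.Int.lt_two_pow_bitLength (n - 1)
      by_contra hc
      have h0 : PySem.Int.bitLength (n - 1) = 0 := by omega
      rw [h0, pow_zero] at this
      omega
    omega
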